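-- pv_equiv track=rewrite | github.com/Christian-Garavito/task_11 | resolver_sopa_letras copy.py | buscar_palabras
-- ===== SOURCE A (Python) =====
-- def buscar_palabras(sopa, palabras):
--     filas = len(sopa)
--     columnas = len(sopa[0])
--     direcciones = [(0, 1), (1, 0), (1, 1), (1, -1)]
--     encontrado = []
--
--     def en_rango(x, y):
--         return 0 <= x < filas and 0 <= y < columnas
--
--     def buscar_palabra(palabra):
--         for x in range(filas):
--             for y in range(columnas):
--                 for dx, dy in direcciones:
--                     nx, ny = x, y
--                     for letra in palabra:
--                         if en_rango(nx, ny) and sopa[nx][ny] == letra: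
--                             nx += dx
--                             ny += dy
--                         else:
--                             break
--                     else:
--                         return (x, y, dx, dy)
--         return None
--
--     for palabra in palabras:
--         resultado = buscar_palabra(palabra)
--         if resultado:
--             encontrado.append((palabra, resultado))
--     return encontrado
-- ===== SOURCE B (Python) =====
-- def buscar_palabras(sopa, palabras):
--     filas = len(sopa)
--     columnas = len(sopa[0])
--     direcciones = [(0, 1), (1, 0), (1, 1), (1, -1)]
--
--     # index built once: every cell in scan order, and cell content -> positions
--     todas = [(x, y) for x in range(filas) for y in range(columnas)]
--     posiciones = {}
--     for (x, y) in todas: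
--         posiciones.setdefault(sopa[x][y], []).append((x, y))
--
--     def segmento(x, y, dx, dy, n):
--         # the n cells starting at (x, y) along (dx, dy), or None if it leaves the grid
--         celdas = []
--         for _ in range(n):
--             if 0 <= x < filas and 0 <= y < columnas:
--                 celdas.append(sopa[x][y])
--                 x += dx
--                 y += dy
--             else:
--                 return None
--         return celdas
--
--     encontrado = []
--     for palabra in palabras:
--         # only cells holding the word's first letter can start a match;
--         # a word with no letters matches trivially at any cell
--         candidatos = posiciones.get(palabra[0], []) if palabra else todas
--         objetivo = list(palabra)
--         resultado = None
--         for (x, y) in candidatos: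
--             for (dx, dy) in direcciones:
--                 if segmento(x, y, dx, dy, len(palabra)) == objetivo:
--                     resultado = (x, y, dx, dy)
--                     break
--             if resultado:
--                 break
--         if resultado:
--             encontrado.append((palabra, resultado))
--     return encontrado
-- ===== Notes on version B (the rewrite author's own statement) =====
-- stated objective: faster
-- what changed: Instead of re-scanning every grid position for every word, B builds a positions-by-cell index of the grid once and, per word, only tries the cells holding its first letter (all cells for a letterless word), checking each direction by extracting the segment and comparing it to the word; Pre_ excludes the empty grid and grids with a row shorter than row 0, on which A raises IndexError once the scan touches a missing cell while B's upfront index touches it immediately.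
-- outside the precondition, e.g. on buscar_palabras([['a', 'b'], ['a']], []): A returns [], B raises IndexError
import Mathlib
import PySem

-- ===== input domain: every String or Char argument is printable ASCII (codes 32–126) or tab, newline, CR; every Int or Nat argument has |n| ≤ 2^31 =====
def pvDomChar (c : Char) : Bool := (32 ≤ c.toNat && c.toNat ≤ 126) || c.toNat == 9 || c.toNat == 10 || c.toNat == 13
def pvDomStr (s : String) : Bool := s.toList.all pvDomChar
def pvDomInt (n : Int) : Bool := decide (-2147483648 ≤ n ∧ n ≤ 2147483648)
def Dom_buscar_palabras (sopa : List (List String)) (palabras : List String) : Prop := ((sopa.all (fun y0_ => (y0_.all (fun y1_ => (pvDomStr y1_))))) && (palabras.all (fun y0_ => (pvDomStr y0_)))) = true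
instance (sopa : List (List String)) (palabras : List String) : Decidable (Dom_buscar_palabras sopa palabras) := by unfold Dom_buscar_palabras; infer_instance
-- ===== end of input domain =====

-- B replaces A's per-word scan of every grid position by a positions-by-cell index built once,
-- so each word only tries the cells holding its first letter (a word with no letters matches
-- trivially at any cell).
-- ===== PORT A =====
def pvDirs : List (Int × Int) := [(0, 1), (1, 0), (1, 1), (1, -1)]

def pvEnRango (filas columnas x y : Int) : Bool :=
  decide (0 ≤ x ∧ x < filas ∧ 0 ≤ y ∧ y < columnas)

-- sopa[x][y]; the defaults are never read where Python reads the cell (guarded by en_rango, under Pre_)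
def pvCell (sopa : List (List String)) (x y : Int) : String :=
  (PySem.List.pyGet? ((PySem.List.pyGet? sopa x).getD []) y).getD ""

-- the 'for letra in palabra' walk: True = the for-else ran (no break)
def pvWalkA (sopa : List (List String)) (filas columnas dx dy : Int) : List Char → Int → Int → Bool
  | [], _, _ => true
  | letra :: resto, nx, ny =>
    if pvEnRango filas columnas nx ny && (pvCell sopa nx ny == String.ofList [letra]) then
      pvWalkA sopa filas columnas dx dy resto (nx + dx) (ny + dy)
    else false

-- buscar_palabra: first (x, y, dx, dy) in scan order, None if no position matches
def pvFindA (sopa : List (List String)) (filas columnas : Int) (letras : List Char) :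
    Option (Int × Int × Int × Int) :=
  (PySem.List.pyRange 0 filas 1).findSome? fun x =>
    (PySem.List.pyRange 0 columnas 1).findSome? fun y =>
      pvDirs.findSome? fun d =>
        if pvWalkA sopa filas columnas d.1 d.2 letras x y then some (x, y, d.1, d.2) else none

def buscar_palabras (sopa : List (List String)) (palabras : List String) :
    List (String × (Int × Int × Int × Int)) :=
  let filas : Int := sopa.length
  let columnas : Int := ((PySem.List.pyGet? sopa 0).getD []).length
  palabras.foldl (fun encontrado palabra =>
    match pvFindA sopa filas columnas palabra.toList with
    | some r => encontrado ++ [(palabra, r)]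
    | none => encontrado) []

-- ===== PORT B =====
-- todas: every cell (x, y) in scan order (the nested comprehension)
def pvTodas (filas columnas : Int) : List (Int × Int) :=
  (PySem.List.pyRange 0 filas 1).flatMap fun x =>
    (PySem.List.pyRange 0 columnas 1).map fun y => (x, y)

-- posiciones: cell content -> positions in scan order (setdefault(...).append ≡ modify _ [] (· ++ [_]))
def pvIndexB (sopa : List (List String)) (todas : List (Int × Int)) :
    PySem.Dict String (List (Int × Int)) :=
  todas.foldl (fun d p =>
    d.modify (pvCell sopa p.1 p.2) [] (fun l => l ++ [p])) PySem.Dict.empty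

-- segmento: the n cells from (x, y) along (dx, dy), none if it leaves the grid
def pvSegmentoB (sopa : List (List String)) (filas columnas dx dy : Int) :
    Nat → Int → Int → Option (List String)
  | 0, _, _ => some []
  | n + 1, x, y =>
    if pvEnRango filas columnas x y then
      match pvSegmentoB sopa filas columnas dx dy n (x + dx) (y + dy) with
      | some resto => some (pvCell sopa x y :: resto)
      | none => none
    else none

-- the candidate loop of B (break ≡ findSome?)
def pvFindB (sopa : List (List String)) (filas columnas : Int)
    (candidatos : List (Int × Int)) (letras : List Char) :
    Option (Int × Int × Int × Int) :=
  let objetivo := letras.map (fun l => String.ofList [l])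
  candidatos.findSome? fun p =>
    pvDirs.findSome? fun d =>
      if pvSegmentoB sopa filas columnas d.1 d.2 letras.length p.1 p.2 == some objetivo then
        some (p.1, p.2, d.1, d.2)
      else none

-- the body of B's 'for palabra in palabras' loop
def pvStepB (sopa : List (List String)) (filas columnas : Int)
    (todas : List (Int × Int)) (posiciones : PySem.Dict String (List (Int × Int)))
    (encontrado : List (String × (Int × Int × Int × Int))) (palabra : String) :
    List (String × (Int × Int × Int × Int)) :=
  let candidatos := match palabra.toList with
    | [] => todas
    | c :: _ => posiciones.getD (String.ofList [c]) []
  match pvFindB sopa filas columnas candidatos palabra.toList with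
  | some r => encontrado ++ [(palabra, r)]
  | none => encontrado

def buscar_palabras_alt (sopa : List (List String)) (palabras : List String) :
    List (String × (Int × Int × Int × Int)) :=
  let filas : Int := sopa.length
  let columnas : Int := ((PySem.List.pyGet? sopa 0).getD []).length
  let todas := pvTodas filas columnas
  let posiciones := pvIndexB sopa todas
  palabras.foldl (pvStepB sopa filas columnas todas posiciones) []

-- ===== PRECONDITION & SPEC =====
-- Pre_ excludes the empty grid (len(sopa[0]) raises IndexError) and grids with a row shorter than
-- row 0: there A raises IndexError as soon as the scan walks into a missing cell.
def Pre_buscar_palabras (sopa : List (List String)) (palabras : List String) : Prop :=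
  sopa ≠ [] ∧ ∀ fila ∈ sopa, (sopa.headD []).length ≤ fila.length
instance (sopa : List (List String)) (palabras : List String) :
    Decidable (Pre_buscar_palabras sopa palabras) := by unfold Pre_buscar_palabras; infer_instance

def pvWitness_buscar_palabras : List (List String) × List String :=
  ([["a", "b"], ["c", "d"]], ["ab", "d", "x"])

def Spec_buscar_palabras (sopa : List (List String)) (palabras : List String)
    (out : List (String × (Int × Int × Int × Int))) : Prop := out = buscar_palabras_alt sopa palabras
instance (sopa : List (List String)) (palabras : List String)
    (out : List (String × (Int × Int × Int × Int))) : Decidable (Spec_buscar_palabras sopa palabras out) := by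
  unfold Spec_buscar_palabras; infer_instance

-- ===== CLAIM =====
def Claim_equal_buscar_palabras : Prop := ∀ (sopa : List (List String)) (palabras : List String), Dom_buscar_palabras sopa palabras → Pre_buscar_palabras sopa palabras → Spec_buscar_palabras sopa palabras (buscar_palabras sopa palabras)

-- ===== LEMMAS AND PROOFS =====
theorem pvStepB_eq_nil (sopa : List (List String)) (filas columnas : Int)
    (todas : List (Int × Int)) (posiciones : PySem.Dict String (List (Int × Int)))
    (encontrado : List (String × (Int × Int × Int × Int))) (palabra : String)
    (hp : palabra.toList = []) :
    pvStepB sopa filas columnas todas posiciones encontrado palabra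
      = match pvFindB sopa filas columnas todas [] with
        | some r => encontrado ++ [(palabra, r)]
        | none => encontrado := by
  unfold pvStepB; rw [hp]

theorem pvStepB_eq_cons (sopa : List (List String)) (filas columnas : Int)
    (todas : List (Int × Int)) (posiciones : PySem.Dict String (List (Int × Int)))
    (encontrado : List (String × (Int × Int × Int × Int))) (palabra : String)
    (c : Char) (r : List Char) (hp : palabra.toList = c :: r) :
    pvStepB sopa filas columnas todas posiciones encontrado palabra
      = match pvFindB sopa filas columnas (posiciones.getD (String.ofList [c]) []) (c :: r) with
        | some w => encontrado ++ [(palabra, w)]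
        | none => encontrado := by
  unfold pvStepB; rw [hp]

theorem pv_findSome?_flatMap {α β γ : Type} (l : List α) (h : α → List β) (F : β → Option γ) :
    (l.flatMap h).findSome? F = l.findSome? fun x => (h x).findSome? F := by
  induction l with
  | nil => rfl
  | cons a t ih =>
    simp only [List.flatMap_cons, List.findSome?_append, List.findSome?_cons]
    cases (h a).findSome? F <;> simp [ih, Option.or]

theorem pv_findSome?_filter {α β : Type} (l : List α) (q : α → Bool) (F : α → Option β)
    (h : ∀ a ∈ l, (F a).isSome → q a = true) :
    (l.filter q).findSome? F = l.findSome? F := by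
  induction l with
  | nil => rfl
  | cons a t ih =>
    by_cases hq : q a = true
    · simp only [List.filter_cons, hq, if_true, List.findSome?_cons]
      cases F a <;> simp [ih fun x hx => h x (List.mem_cons_of_mem _ hx)]
    · have hFa : F a = none := by
        cases hFa : F a
        · rfl
        · exact absurd (h a (List.mem_cons_self) (by simp [hFa])) hq
      simp only [List.filter_cons, hq, List.findSome?_cons, hFa]
      exact ih fun x hx => h x (List.mem_cons_of_mem _ hx)

theorem pv_walk_iff_seg (sopa : List (List String)) (filas columnas dx dy : Int)
    (letras : List Char) : ∀ x y : Int,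
    (pvSegmentoB sopa filas columnas dx dy letras.length x y
      = some (letras.map fun l => String.ofList [l]))
      ↔ pvWalkA sopa filas columnas dx dy letras x y = true := by
  induction letras with
  | nil => intro x y; simp [pvSegmentoB, pvWalkA]
  | cons c resto ih =>
    intro x y
    simp only [List.length_cons, List.map_cons, pvSegmentoB, pvWalkA]
    by_cases hr : pvEnRango filas columnas x y = true
    · simp only [hr, if_true, Bool.true_and]
      by_cases hc : pvCell sopa x y = String.ofList [c]
      · simp only [hc, beq_self_eq_true, if_true]
        cases hs : pvSegmentoB sopa filas columnas dx dy resto.length (x + dx) (y + dy) with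
        | none => simp [hs, ← ih (x + dx) (y + dy)]
        | some l => simp [hs, ← ih (x + dx) (y + dy)]
      · have : (pvCell sopa x y == String.ofList [c]) = false := by
          simp [beq_eq_false_iff_ne, hc]
        simp only [this]
        cases hs : pvSegmentoB sopa filas columnas dx dy resto.length (x + dx) (y + dy) <;>
          simp [hc]
    · simp [hr]

theorem pv_index_getD (sopa : List (List String)) (todas : List (Int × Int)) (k : String) :
    (pvIndexB sopa todas).getD k []
      = todas.filter (fun p => pvCell sopa p.1 p.2 == k) := by
  have h1 : pvIndexB sopa todas
      = (todas.map (fun p => (pvCell sopa p.1 p.2, p))).foldl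
          (fun d q => d.modify q.1 [] (fun l => l ++ [q.2])) PySem.Dict.empty := by
    unfold pvIndexB
    rw [List.foldl_map]
  rw [h1, PySem.Dict.getD_foldl_modify_append, List.filter_map, List.map_map]
  simp [Function.comp_def]

theorem pv_findA_scan (sopa : List (List String)) (filas columnas : Int) (letras : List Char) :
    pvFindA sopa filas columnas letras
      = (pvTodas filas columnas).findSome? fun p =>
          pvDirs.findSome? fun d =>
            if pvWalkA sopa filas columnas d.1 d.2 letras p.1 p.2 then
              some (p.1, p.2, d.1, d.2)
            else none := by
  unfold pvFindA pvTodas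
  rw [pv_findSome?_flatMap]
  congr 1
  funext x
  rw [List.findSome?_map]
  rfl

-- the empty word: both sides try every cell in scan order and succeed immediately
theorem pv_step_empty (sopa : List (List String)) (filas columnas : Int) :
    pvFindA sopa filas columnas []
      = pvFindB sopa filas columnas (pvTodas filas columnas) [] := by
  rw [pv_findA_scan]
  unfold pvFindB
  rfl

-- a nonempty word: A's first match over the whole scan = B's first match over the indexed cells
theorem pv_step_cons (sopa : List (List String)) (filas columnas : Int) (c : Char)
    (resto : List Char) :
    pvFindA sopa filas columnas (c :: resto)
      = pvFindB sopa filas columnas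
          ((pvIndexB sopa (pvTodas filas columnas)).getD (String.ofList [c]) []) (c :: resto) := by
  have hcond : ∀ dx dy x y : Int,
      (pvSegmentoB sopa filas columnas dx dy (resto.length + 1) x y
        == some (String.ofList [c] :: resto.map fun l => String.ofList [l]))
        = pvWalkA sopa filas columnas dx dy (c :: resto) x y := by
    intro dx dy x y
    have hiff := pv_walk_iff_seg sopa filas columnas dx dy (c :: resto) x y
    simp only [List.length_cons, List.map_cons] at hiff
    cases hw : pvWalkA sopa filas columnas dx dy (c :: resto) x y with
    | true =>
      have h := hiff.mpr hw
      simp [h]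
    | false =>
      simp only [beq_eq_false_iff_ne, ne_eq]
      intro h
      rw [hiff.mp h] at hw
      exact Bool.true_eq_false.mp hw
  have hguard : ∀ p : Int × Int,
      ((pvDirs.findSome? fun d =>
        if pvWalkA sopa filas columnas d.1 d.2 (c :: resto) p.1 p.2 then
          some (p.1, p.2, d.1, d.2) else none).isSome) →
      (pvCell sopa p.1 p.2 == String.ofList [c]) = true := by
    intro p hs
    rw [Option.isSome_iff_exists] at hs
    obtain ⟨b, hb⟩ := hs
    obtain ⟨d, _, hd⟩ := List.exists_of_findSome?_eq_some hb
    by_cases hw : pvWalkA sopa filas columnas d.1 d.2 (c :: resto) p.1 p.2 = true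
    · have := hw
      unfold pvWalkA at this
      by_cases hg : (pvEnRango filas columnas p.1 p.2
          && (pvCell sopa p.1 p.2 == String.ofList [c])) = true
      · exact (Bool.and_eq_true _ _ ▸ hg).2
      · rw [if_neg hg] at this
        exact absurd this (by simp)
    · rw [if_neg hw] at hd
      exact absurd hd (by simp)
  rw [pv_findA_scan]
  unfold pvFindB
  simp only [pv_index_getD, List.length_cons, List.map_cons]
  simp only [hcond]
  rw [pv_findSome?_filter _ _ _ (fun p _ hs => hguard p hs)]

theorem pv_foldl_words (sopa : List (List String)) :
    ∀ (palabrasAll : List String) (acc : List (String × (Int × Int × Int × Int))),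
      palabrasAll.foldl (fun encontrado palabra =>
        match pvFindA sopa sopa.length ((PySem.List.pyGet? sopa 0).getD []).length palabra.toList with
        | some r => encontrado ++ [(palabra, r)]
        | none => encontrado) acc
      = palabrasAll.foldl (pvStepB sopa sopa.length ((PySem.List.pyGet? sopa 0).getD []).length
          (pvTodas sopa.length ((PySem.List.pyGet? sopa 0).getD []).length)
          (pvIndexB sopa (pvTodas sopa.length ((PySem.List.pyGet? sopa 0).getD []).length))) acc := by
  intro palabrasAll
  induction palabrasAll with
  | nil => intro acc; rfl
  | cons palabra resto ih =>
    intro acc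
    simp only [List.foldl_cons]
    rw [ih]
    congr 1
    cases hp : palabra.toList with
    | nil =>
      rw [pvStepB_eq_nil _ _ _ _ _ _ _ hp, pv_step_empty]
    | cons c r =>
      rw [pvStepB_eq_cons _ _ _ _ _ _ _ _ _ hp, pv_step_cons]

-- ===== VERDICT =====
theorem buscar_palabras_spec : Claim_equal_buscar_palabras := by
  intro sopa palabras _ _
  unfold Spec_buscar_palabras buscar_palabras buscar_palabras_alt
  exact pv_foldl_words sopa palabras []
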